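-- pv_equiv track=rewrite | github.com/geclower/Algo-Practice | July 2024/July 1st/hurdleRace.py | hurdleRace
-- ===== SOURCE A (Python) =====
-- def hurdleRace(k,height):
--     doses = 0
--     jump = k
--
--     for i in range(len(height)):
--         if height[i] > jump:
--             doses += (height[i]-jump)
--             jump = height[i]
--
--     return doses
-- ===== SOURCE B (Python) =====
-- def hurdleRace(k, height):
--     return max(max(height) - k, 0) if height else 0
-- ===== Notes on version B (the rewrite author's own statement) =====
-- stated objective: simpler
-- what changed: The per-element accumulation loop telescopes, so B replaces it with the closed form max(max(height) - k, 0) (0 for an empty list).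
import Mathlib
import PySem

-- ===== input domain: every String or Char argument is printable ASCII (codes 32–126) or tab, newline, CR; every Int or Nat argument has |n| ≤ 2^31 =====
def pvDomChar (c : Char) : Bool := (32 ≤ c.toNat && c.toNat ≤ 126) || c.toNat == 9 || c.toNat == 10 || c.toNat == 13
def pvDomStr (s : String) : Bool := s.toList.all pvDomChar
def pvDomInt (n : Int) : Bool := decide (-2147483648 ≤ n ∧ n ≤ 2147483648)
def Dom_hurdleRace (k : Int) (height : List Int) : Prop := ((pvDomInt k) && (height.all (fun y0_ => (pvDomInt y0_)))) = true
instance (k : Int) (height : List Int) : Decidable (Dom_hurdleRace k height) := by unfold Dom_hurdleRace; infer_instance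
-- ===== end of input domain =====

-- B replaces A's accumulation loop by the closed form max(max(height) - k, 0); return-value equivalence, no mutation involved.

-- ===== PORT A =====
-- A's loop 'for i in range(len(height))' with state (doses, jump); height[i] is always
-- in range, so pyGetD with default 0 is exact here.
def hurdleRace (k : Int) (height : List Int) : Int :=
  ((PySem.List.pyRange 0 (height.length : Int) 1).foldl
    (fun (st : Int × Int) i =>
      let h := PySem.List.pyGetD height i 0
      if h > st.2 then (st.1 + (h - st.2), h) else st)
    (0, k)).1

-- ===== PORT B =====
-- 'max(max(height) - k, 0) if height else 0'
def hurdleRace_alt (k : Int) (height : List Int) : Int :=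
  if height = [] then 0
  else
    match PySem.List.max? height (fun y => y) with
    | some m => max (m - k) 0
    | none => 0

-- ===== PRECONDITION & SPEC =====
def Spec_hurdleRace (k : Int) (height : List Int) (out : Int) : Prop := out = hurdleRace_alt k height
instance (k : Int) (height : List Int) (out : Int) : Decidable (Spec_hurdleRace k height out) := by unfold Spec_hurdleRace; infer_instance

-- ===== CLAIM (what is proved, stated in full; the proofs are below) =====
def Claim_equal_hurdleRace : Prop := ∀ (k : Int) (height : List Int), Dom_hurdleRace k height → Spec_hurdleRace k height (hurdleRace k height)

-- ===== LEMMAS AND PROOFS =====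

-- A's loop invariant: final doses = initial doses + (running max − initial jump).
theorem hurdleRace_loop (xs : List Int) (d j : Int) :
    (xs.foldl
      (fun (st : Int × Int) h =>
        if h > st.2 then (st.1 + (h - st.2), h) else st) (d, j))
    = (d + (xs.foldl max j - j), xs.foldl max j) := by
  induction xs generalizing d j with
  | nil => simp
  | cons x t ih =>
    simp only [List.foldl_cons]
    by_cases hx : x > j
    · rw [if_pos hx, ih]
      have : max j x = x := max_eq_right (le_of_lt hx)
      rw [this]; ring_nf
    · rw [if_neg hx, ih]
      have : max j x = j := max_eq_left (by omega)
      rw [this]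

theorem foldl_max_pull (t : List Int) (a b : Int) :
    t.foldl max (max a b) = max a (t.foldl max b) := by
  induction t generalizing a b with
  | nil => simp
  | cons c t ih =>
    simp only [List.foldl_cons]
    rw [max_assoc, ih]

-- ===== VERDICT (by name: the statement is the Claim_ definition above) =====
theorem hurdleRace_spec : Claim_equal_hurdleRace := by
  intro k height _
  unfold Spec_hurdleRace hurdleRace hurdleRace_alt
  rw [PySem.List.foldl_pyRange_zero_pyGetD' height 0
    (fun (st : Int × Int) h => if h > st.2 then (st.1 + (h - st.2), h) else st) (0, k)]
  rw [hurdleRace_loop]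
  cases height with
  | nil => simp
  | cons h t =>
    rw [if_neg (by simp), PySem.List.max?_id_cons]
    simp only [List.foldl_cons]
    rw [foldl_max_pull]
    omega
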